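-- pv_equiv track=rewrite | github.com/cathyxl/covid_lock_map | web/server/deal_with_crawled_data.py | predict_lock_for_region
-- ===== SOURCE A (Python) =====
-- def predict_lock_for_region(lock_list):
--     """
--     Combine all lock prediction results to get the final result
--     Here we just choose the lock class with the maximum amount
--     :param lock_list:
--     :return: lock class, relative weibo file ids
--     """
--     lock_count = {1: 0, 2: 0, 3: 0}
--     for lock in lock_list:
--         if lock[1]:
--             lock_count[lock[1]] += 1
--     pred_lock = sorted(lock_count.items(), key=lambda k: k[1])[-1]
--
--     rel_ids = []
--     for lock in lock_list:
--         if lock[1] == pred_lock[0]: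
--             rel_ids.append(lock[0])
--     return pred_lock[0], rel_ids
-- ===== SOURCE B (Python) =====
-- def predict_lock_for_region(lock_list):
--     # One grouping pass + constant-size selection instead of count-then-rescan.
--     groups = {1: [], 2: [], 3: []}
--     for lock in lock_list:
--         if lock[1]:
--             groups[lock[1]].append(lock[0])
--     pred = max(groups.items(), key=lambda kv: (len(kv[1]), kv[0]))
--     return pred[0], pred[1]
-- ===== Notes on version B (the rewrite author's own statement) =====
-- stated objective: simpler
-- what changed: A counts classes in a dict, sorts the count items to pick the winner, then rescans the whole list to collect matching ids; B groups ids by class in one pass into a pre-seeded dict of lists and picks the winner with a single constant-size max over the 3 items keyed by (count, class), so the sort and the second pass over the list disappear.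
import Mathlib
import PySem

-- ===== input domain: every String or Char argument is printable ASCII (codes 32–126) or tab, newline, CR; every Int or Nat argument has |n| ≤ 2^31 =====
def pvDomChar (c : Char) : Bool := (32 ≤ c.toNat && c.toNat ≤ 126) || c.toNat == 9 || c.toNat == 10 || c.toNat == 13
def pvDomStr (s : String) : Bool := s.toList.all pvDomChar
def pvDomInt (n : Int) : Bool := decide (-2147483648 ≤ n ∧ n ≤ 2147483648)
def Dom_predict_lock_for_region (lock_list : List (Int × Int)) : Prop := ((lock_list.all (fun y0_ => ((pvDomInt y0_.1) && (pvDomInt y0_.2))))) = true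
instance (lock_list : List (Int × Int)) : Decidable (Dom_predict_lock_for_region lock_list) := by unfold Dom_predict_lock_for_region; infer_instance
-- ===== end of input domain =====

-- B replaces A's count-then-rescan (count dict + sort + second pass over the list) by one grouping
-- pass into pre-seeded id lists plus a constant-size max selection; objective: simpler.


-- ===== PORT A =====
-- 'lock_count[lock[1]] += 1' is ported with Dict.modify: exact on Pre_, where the key is always
-- present (on an absent key Python raises KeyError; Pre_ excludes that). The dict always has 3
-- items, so sorted(...)[-1] never raises and the '.getD (0, 0)' default is unreachable.
def predict_lock_for_region (lock_list : List (Int × Int)) : Int × List Int :=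
  let lock_count : PySem.Dict Int Int := PySem.Dict.ofList [(1, 0), (2, 0), (3, 0)]
  let lock_count := lock_list.foldl
    (fun d lock => if lock.2 ≠ 0 then d.modify lock.2 0 (· + 1) else d) lock_count
  let pred_lock :=
    (PySem.List.pyGet? (PySem.List.sorted lock_count.items (fun k => k.2) false) (-1)).getD (0, 0)
  let rel_ids := lock_list.foldl
    (fun acc lock => if lock.2 = pred_lock.1 then acc ++ [lock.1] else acc) []
  (pred_lock.1, rel_ids)

-- ===== PORT B =====
-- 'groups[lock[1]].append(lock[0])' likewise via Dict.modify (exact on Pre_, where the key exists);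
-- max over the 3 items with tuple key (len(ids), class) is max2?; never none, '.getD' unreachable.
def predict_lock_for_region_alt (lock_list : List (Int × Int)) : Int × List Int :=
  let groups : PySem.Dict Int (List Int) := PySem.Dict.ofList [(1, []), (2, []), (3, [])]
  let groups := lock_list.foldl
    (fun d lock => if lock.2 ≠ 0 then d.modify lock.2 [] (· ++ [lock.1]) else d) groups
  let pred :=
    (PySem.List.max2? groups.items (fun kv => (kv.2.length : Int)) (fun kv => kv.1)).getD (0, [])
  (pred.1, pred.2)

-- ===== PRECONDITION & SPEC =====
-- Pre_ excludes exactly the inputs on which A raises KeyError: a pair whose truthy lock class is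
-- not one of the pre-seeded keys 1, 2, 3 (B raises KeyError there too).
def Pre_predict_lock_for_region (lock_list : List (Int × Int)) : Prop :=
  ∀ p ∈ lock_list, p.2 = 0 ∨ p.2 = 1 ∨ p.2 = 2 ∨ p.2 = 3
instance (lock_list : List (Int × Int)) : Decidable (Pre_predict_lock_for_region lock_list) := by
  unfold Pre_predict_lock_for_region; infer_instance
def pvWitness_predict_lock_for_region : (List (Int × Int)) := [(5, 1), (6, 2), (7, 2), (8, 0)]

def Spec_predict_lock_for_region (lock_list : List (Int × Int)) (out : Int × List Int) : Prop := out = predict_lock_for_region_alt lock_list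
instance (lock_list : List (Int × Int)) (out : Int × List Int) : Decidable (Spec_predict_lock_for_region lock_list out) := by unfold Spec_predict_lock_for_region; infer_instance

-- ===== CLAIM (what is proved, stated in full; the proofs are below) =====
def Claim_equal_predict_lock_for_region : Prop := ∀ (lock_list : List (Int × Int)), Dom_predict_lock_for_region lock_list → Pre_predict_lock_for_region lock_list → Spec_predict_lock_for_region lock_list (predict_lock_for_region lock_list)

-- ===== LEMMAS AND PROOFS =====

-- A's count loop keeps the dict in shape {1: ·, 2: ·, 3: ·} and adds per-class occurrence counts.
theorem pvFoldA (l : List (Int × Int))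
    (hp : ∀ p ∈ l, p.2 = 0 ∨ p.2 = 1 ∨ p.2 = 2 ∨ p.2 = 3) (a b c : Int) :
    l.foldl (fun d lock => if lock.2 ≠ 0 then d.modify lock.2 0 (· + 1) else d)
        (PySem.Dict.ofList [(1, a), (2, b), (3, c)])
    = PySem.Dict.ofList [(1, a + l.countP (fun p => decide (p.2 = 1))),
                         (2, b + l.countP (fun p => decide (p.2 = 2))),
                         (3, c + l.countP (fun p => decide (p.2 = 3)))] := by
  induction l generalizing a b c with
  | nil => simp
  | cons x t ih =>
    have ht : ∀ p ∈ t, p.2 = 0 ∨ p.2 = 1 ∨ p.2 = 2 ∨ p.2 = 3 :=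
      fun p hpmem => hp p (List.mem_cons_of_mem _ hpmem)
    rcases hp x List.mem_cons_self with h|h|h|h
    · have hstep : (if x.2 ≠ 0 then (PySem.Dict.ofList [((1:Int), a), (2, b), (3, c)]).modify x.2 0 (· + 1)
          else PySem.Dict.ofList [((1:Int), a), (2, b), (3, c)])
          = PySem.Dict.ofList [((1:Int), a), (2, b), (3, c)] := by simp [h]
      rw [List.foldl_cons, hstep, ih ht]; simp [h]
    · have hstep : (if x.2 ≠ 0 then (PySem.Dict.ofList [((1:Int), a), (2, b), (3, c)]).modify x.2 0 (· + 1)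
          else PySem.Dict.ofList [((1:Int), a), (2, b), (3, c)])
          = PySem.Dict.ofList [((1:Int), a + 1), (2, b), (3, c)] := by
        rw [if_pos (by rw [h]; decide), h]; rfl
      rw [List.foldl_cons, hstep, ih ht]; simp [h]; ring_nf
    · have hstep : (if x.2 ≠ 0 then (PySem.Dict.ofList [((1:Int), a), (2, b), (3, c)]).modify x.2 0 (· + 1)
          else PySem.Dict.ofList [((1:Int), a), (2, b), (3, c)])
          = PySem.Dict.ofList [((1:Int), a), (2, b + 1), (3, c)] := by
        rw [if_pos (by rw [h]; decide), h]; rfl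
      rw [List.foldl_cons, hstep, ih ht]; simp [h]; ring_nf
    · have hstep : (if x.2 ≠ 0 then (PySem.Dict.ofList [((1:Int), a), (2, b), (3, c)]).modify x.2 0 (· + 1)
          else PySem.Dict.ofList [((1:Int), a), (2, b), (3, c)])
          = PySem.Dict.ofList [((1:Int), a), (2, b), (3, c + 1)] := by
        rw [if_pos (by rw [h]; decide), h]; rfl
      rw [List.foldl_cons, hstep, ih ht]; simp [h]; ring_nf

-- B's grouping loop keeps the dict in shape {1: ·, 2: ·, 3: ·} and appends per-class id lists.
theorem pvFoldB (l : List (Int × Int))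
    (hp : ∀ p ∈ l, p.2 = 0 ∨ p.2 = 1 ∨ p.2 = 2 ∨ p.2 = 3) (a b c : List Int) :
    l.foldl (fun d lock => if lock.2 ≠ 0 then d.modify lock.2 [] (· ++ [lock.1]) else d)
        (PySem.Dict.ofList [(1, a), (2, b), (3, c)])
    = PySem.Dict.ofList [(1, a ++ (l.filter (fun p => decide (p.2 = 1))).map (·.1)),
                         (2, b ++ (l.filter (fun p => decide (p.2 = 2))).map (·.1)),
                         (3, c ++ (l.filter (fun p => decide (p.2 = 3))).map (·.1))] := by
  induction l generalizing a b c with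
  | nil => simp
  | cons x t ih =>
    have ht : ∀ p ∈ t, p.2 = 0 ∨ p.2 = 1 ∨ p.2 = 2 ∨ p.2 = 3 :=
      fun p hpmem => hp p (List.mem_cons_of_mem _ hpmem)
    rcases hp x List.mem_cons_self with h|h|h|h
    · have hstep : (if x.2 ≠ 0 then (PySem.Dict.ofList [((1:Int), a), (2, b), (3, c)]).modify x.2 [] (· ++ [x.1])
          else PySem.Dict.ofList [((1:Int), a), (2, b), (3, c)])
          = PySem.Dict.ofList [((1:Int), a), (2, b), (3, c)] := by simp [h]
      rw [List.foldl_cons, hstep, ih ht]; simp [h]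
    · have hstep : (if x.2 ≠ 0 then (PySem.Dict.ofList [((1:Int), a), (2, b), (3, c)]).modify x.2 [] (· ++ [x.1])
          else PySem.Dict.ofList [((1:Int), a), (2, b), (3, c)])
          = PySem.Dict.ofList [((1:Int), a ++ [x.1]), (2, b), (3, c)] := by
        rw [if_pos (by rw [h]; decide), h]; rfl
      rw [List.foldl_cons, hstep, ih ht]; simp [h]
    · have hstep : (if x.2 ≠ 0 then (PySem.Dict.ofList [((1:Int), a), (2, b), (3, c)]).modify x.2 [] (· ++ [x.1])
          else PySem.Dict.ofList [((1:Int), a), (2, b), (3, c)])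
          = PySem.Dict.ofList [((1:Int), a), (2, b ++ [x.1]), (3, c)] := by
        rw [if_pos (by rw [h]; decide), h]; rfl
      rw [List.foldl_cons, hstep, ih ht]; simp [h]
    · have hstep : (if x.2 ≠ 0 then (PySem.Dict.ofList [((1:Int), a), (2, b), (3, c)]).modify x.2 [] (· ++ [x.1])
          else PySem.Dict.ofList [((1:Int), a), (2, b), (3, c)])
          = PySem.Dict.ofList [((1:Int), a), (2, b), (3, c ++ [x.1])] := by
        rw [if_pos (by rw [h]; decide), h]; rfl
      rw [List.foldl_cons, hstep, ih ht]; simp [h]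

-- items of the literal {1: x, 2: y, 3: z} dict
theorem pvItems3 {n : Type} (x y z : n) :
    (PySem.Dict.ofList [((1:Int), x), (2, y), (3, z)]).items = [((1:Int), x), (2, y), (3, z)] := rfl

-- last element of Python's stable sort of a 3-item count dict: highest count, ties to highest class
theorem pvSortedLast (a b c : Int) :
    (PySem.List.pyGet? (PySem.List.sorted [((1:Int),a),(2,b),(3,c)] (fun k => k.2) false) (-1)).getD (0,0)
    = if a ≤ c ∧ b ≤ c then (3,c) else if a ≤ b then (2,b) else (1,a) := by
  by_cases h1 : b < a <;> by_cases h2 : c < a <;> by_cases h3 : c < b <;>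
    simp [PySem.List.sorted, PySem.List.insertBy, PySem.List.pyGet?, PySem.List.pyIdx?, h1, h2, h3] <;>
    split_ifs <;> simp_all <;> omega

-- Python's max over the 3 group items with key (len, class): same selection rule
theorem pvMax3 (g1 g2 g3 : List Int) :
    (PySem.List.max2? [((1:Int),g1),(2,g2),(3,g3)] (fun kv => (kv.2.length : Int)) (fun kv => kv.1)).getD (0,[])
    = if g1.length ≤ g3.length ∧ g2.length ≤ g3.length then (3,g3)
      else if g1.length ≤ g2.length then (2,g2) else (1,g1) := by
  by_cases h1 : g1.length ≤ g2.length <;>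
    simp [PySem.List.max2?, h1] <;> split_ifs <;>
    (try simp_all) <;> (try split_ifs) <;> (try simp_all) <;> omega

-- ===== VERDICT (by name: the statement is the Claim_ definition above) =====
theorem predict_lock_for_region_spec : Claim_equal_predict_lock_for_region := by
  intro l _ hpre
  unfold Spec_predict_lock_for_region predict_lock_for_region predict_lock_for_region_alt
  dsimp only
  rw [pvFoldA l hpre 0 0 0, pvFoldB l hpre [] [] []]
  simp only [zero_add, List.nil_append]
  rw [pvItems3, pvItems3, pvSortedLast, pvMax3]
  simp only [List.length_map, ← List.countP_eq_length_filter, Nat.cast_le]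
  split_ifs with hc1 hc2 <;>
    simp_all [List.countP_eq_length_filter, PySem.List.foldl_append_ite]
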